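-- pv_equiv track=rewrite | github.com/hopo55/Seg-NAS | hyundai/utils/skeleton.py | check_NG_conditions
-- ===== SOURCE A (Python) =====
-- def check_NG_conditions(lengths, min_threshold, min_NG_count, over_threshold):
--     # 1. 연속으로 min_threshold 이하인 값이 min_NG_count 이상 있는지 확인
--     consecutive_count = 0
--     for length in lengths:
--         if length < min_threshold:
--             consecutive_count += 1
--             if consecutive_count >= min_NG_count:
--                 return True
--         else:
--             consecutive_count = 0
--
--     # 2. over_threshold 초과 값이 존재하는지 확인
--     if any(length > over_threshold for length in lengths):
--         return True
--     return False
-- ===== SOURCE B (Python) =====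
-- def check_NG_conditions(lengths, min_threshold, min_NG_count, over_threshold):
--     # Pass 1: collect the lengths of the maximal runs of consecutive
--     # below-threshold values, then judge the longest run once.
--     runs = []
--     current = 0
--     for x in lengths:
--         if x < min_threshold:
--             current += 1
--         else:
--             if current:
--                 runs.append(current)
--             current = 0
--     if current:
--         runs.append(current)
--     if runs and max(runs) >= min_NG_count:
--         return True
--     # Pass 2: any overlong value.
--     return any(x > over_threshold for x in lengths)
-- ===== Notes on version B (the rewrite author's own statement) =====
-- stated objective: alternative
-- what changed: A early-returns while counting consecutive below-threshold values inside the scan; B first splits the list into maximal below-threshold runs, compares the longest run against min_NG_count once, then does the over-threshold pass.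
import Mathlib
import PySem

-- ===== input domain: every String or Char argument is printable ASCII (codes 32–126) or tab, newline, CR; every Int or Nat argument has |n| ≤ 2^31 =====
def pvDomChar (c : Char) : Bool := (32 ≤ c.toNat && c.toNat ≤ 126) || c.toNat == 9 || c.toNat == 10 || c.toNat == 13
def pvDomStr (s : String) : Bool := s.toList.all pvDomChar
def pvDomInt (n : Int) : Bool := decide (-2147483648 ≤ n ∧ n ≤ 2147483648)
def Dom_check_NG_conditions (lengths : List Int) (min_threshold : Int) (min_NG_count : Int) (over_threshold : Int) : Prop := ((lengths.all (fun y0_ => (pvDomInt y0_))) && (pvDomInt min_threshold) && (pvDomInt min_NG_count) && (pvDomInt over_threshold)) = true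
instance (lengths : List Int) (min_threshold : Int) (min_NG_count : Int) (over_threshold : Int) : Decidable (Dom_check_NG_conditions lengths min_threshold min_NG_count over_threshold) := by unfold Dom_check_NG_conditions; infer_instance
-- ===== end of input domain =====

-- B replaces A's in-scan early-return counter by a run-splitting pass (longest below-threshold
-- run judged once) followed by the over-threshold pass; same cost, different decomposition.

-- ===== PORT A =====
-- A's for-loop with its early `return True`: `some true` = early return, `none` = loop finished.
def check_NG_loop (mt k : Int) : List Int → Int → Option Bool
  | [], _ => none
  | x :: xs, cc =>
    if x < mt then
      if k ≤ cc + 1 then some true else check_NG_loop mt k xs (cc + 1)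
    else check_NG_loop mt k xs 0

def check_NG_conditions (lengths : List Int) (min_threshold : Int) (min_NG_count : Int) (over_threshold : Int) : Bool :=
  match check_NG_loop min_threshold min_NG_count lengths 0 with
  | some b => b
  | none =>
    if lengths.any (fun l => decide (over_threshold < l)) then true else false

-- ===== PORT B =====
-- Source B's run-collecting loop (runs/current accumulators) as a fold, plus the final flush.
def check_NG_runs (mt : Int) (lengths : List Int) : List Int :=
  let st := lengths.foldl
    (fun (st : List Int × Int) x =>
      if x < mt then (st.1, st.2 + 1)
      else if st.2 ≠ 0 then (st.1 ++ [st.2], 0) else (st.1, 0))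
    ([], 0)
  if st.2 ≠ 0 then st.1 ++ [st.2] else st.1

def check_NG_conditions_alt (lengths : List Int) (min_threshold : Int) (min_NG_count : Int) (over_threshold : Int) : Bool :=
  match PySem.List.max? (check_NG_runs min_threshold lengths) (fun y => y) with
  | some m =>
    if min_NG_count ≤ m then true
    else lengths.any (fun x => decide (over_threshold < x))
  | none => lengths.any (fun x => decide (over_threshold < x))

-- ===== PRECONDITION & SPEC =====
def Spec_check_NG_conditions (lengths : List Int) (min_threshold : Int) (min_NG_count : Int) (over_threshold : Int) (out : Bool) : Prop := out = check_NG_conditions_alt lengths min_threshold min_NG_count over_threshold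
instance (lengths : List Int) (min_threshold : Int) (min_NG_count : Int) (over_threshold : Int) (out : Bool) : Decidable (Spec_check_NG_conditions lengths min_threshold min_NG_count over_threshold out) := by unfold Spec_check_NG_conditions; infer_instance

-- ===== CLAIM (what is proved, stated in full; the proofs are below) =====
def Claim_equal_check_NG_conditions : Prop := ∀ (lengths : List Int) (min_threshold : Int) (min_NG_count : Int) (over_threshold : Int), Dom_check_NG_conditions lengths min_threshold min_NG_count over_threshold → Spec_check_NG_conditions lengths min_threshold min_NG_count over_threshold (check_NG_conditions lengths min_threshold min_NG_count over_threshold)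

-- ===== LEMMAS AND PROOFS =====

-- Proof-side spec: max value ever attained by A's counter at an increment step
-- (sentinel -2^40 if the counter is never incremented).
def pvMx (mt : Int) : List Int → Int → Int
  | [], _ => -1099511627776
  | x :: xs, cur => if x < mt then max (cur + 1) (pvMx mt xs (cur + 1)) else pvMx mt xs 0

-- Proof-side spec: the run list B builds, recursively.
def pvRuns (mt : Int) : List Int → Int → List Int
  | [], cur => if cur ≠ 0 then [cur] else []
  | x :: xs, cur =>
    if x < mt then pvRuns mt xs (cur + 1)
    else if cur ≠ 0 then cur :: pvRuns mt xs 0 else pvRuns mt xs 0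

def pvLmax (l : List Int) : Int := l.foldl max (-1099511627776)

theorem pv_foldl_max_max (l : List Int) : ∀ a b : Int, l.foldl max (max a b) = max a (l.foldl max b) := by
  induction l with
  | nil => intro a b; simp
  | cons x t ih =>
    intro a b
    simp only [List.foldl_cons]
    rw [max_assoc, ih]

theorem pv_le_foldl_max (l : List Int) : ∀ b : Int, b ≤ l.foldl max b := by
  induction l with
  | nil => intro b; simp
  | cons x t ih =>
    intro b
    simp only [List.foldl_cons]
    exact le_trans (le_max_left b x) (ih _)

theorem pv_loop_cases (mt k : Int) (xs : List Int) : ∀ cc : Int,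
    check_NG_loop mt k xs cc = none ∨ check_NG_loop mt k xs cc = some true := by
  induction xs with
  | nil => intro cc; left; rfl
  | cons x t ih =>
    intro cc
    by_cases hx : x < mt
    · by_cases hk : k ≤ cc + 1
      · right; simp [check_NG_loop, hx, hk]
      · simpa [check_NG_loop, hx, hk] using ih (cc + 1)
    · simpa [check_NG_loop, hx] using ih 0

theorem pv_loop_iff (mt k : Int) (hk : -1099511627776 < k) (xs : List Int) : ∀ cc : Int,
    (check_NG_loop mt k xs cc = some true ↔ k ≤ pvMx mt xs cc) := by
  induction xs with
  | nil =>
    intro cc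
    simp only [check_NG_loop, pvMx]
    constructor
    · intro h; cases h
    · intro h; omega
  | cons x t ih =>
    intro cc
    simp only [check_NG_loop, pvMx]
    by_cases hx : x < mt
    · rw [if_pos hx, if_pos hx]
      by_cases hcond : k ≤ cc + 1
      · rw [if_pos hcond]
        constructor
        · intro _; exact le_trans hcond (le_max_left _ _)
        · intro _; rfl
      · rw [if_neg hcond, ih (cc + 1)]
        omega
    · rw [if_neg hx, if_neg hx]
      exact ih 0

theorem pv_runs_pos (mt : Int) (xs : List Int) : ∀ cur : Int, 0 ≤ cur →
    ∀ r ∈ pvRuns mt xs cur, 0 < r := by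
  induction xs with
  | nil =>
    intro cur hcur r hr
    simp only [pvRuns] at hr
    by_cases h : cur ≠ 0
    · rw [if_pos h] at hr; simp at hr; omega
    · rw [if_neg h] at hr; simp at hr
  | cons x t ih =>
    intro cur hcur r hr
    simp only [pvRuns] at hr
    by_cases hx : x < mt
    · rw [if_pos hx] at hr
      exact ih (cur + 1) (by omega) r hr
    · rw [if_neg hx] at hr
      by_cases h : cur ≠ 0
      · rw [if_pos h] at hr
        rcases List.mem_cons.1 hr with rfl | hr2
        · omega
        · exact ih 0 le_rfl r hr2
      · rw [if_neg h] at hr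
        exact ih 0 le_rfl r hr

theorem pv_cur_le_lmax (mt : Int) (xs : List Int) : ∀ cur : Int, 0 < cur →
    cur ≤ pvLmax (pvRuns mt xs cur) := by
  induction xs with
  | nil =>
    intro cur hcur
    simp only [pvRuns]
    rw [if_pos (by omega : cur ≠ 0)]
    simp only [pvLmax, List.foldl_cons, List.foldl_nil]
    omega
  | cons x t ih =>
    intro cur hcur
    simp only [pvRuns]
    by_cases hx : x < mt
    · rw [if_pos hx]
      have := ih (cur + 1) (by omega)
      omega
    · rw [if_neg hx, if_pos (by omega : cur ≠ 0)]
      simp only [pvLmax, List.foldl_cons]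
      rw [max_comm (-1099511627776 : Int) cur, pv_foldl_max_max]
      exact le_max_left _ _

theorem pv_main (mt : Int) (xs : List Int) : ∀ cur : Int, 0 ≤ cur →
    max (pvMx mt xs cur) cur = max (pvLmax (pvRuns mt xs cur)) cur := by
  induction xs with
  | nil =>
    intro cur hcur
    simp only [pvMx, pvRuns]
    by_cases h : cur ≠ 0
    · rw [if_pos h]
      simp only [pvLmax, List.foldl_cons, List.foldl_nil]
      omega
    · rw [if_neg h]
      simp only [pvLmax, List.foldl_nil]
  | cons x t ih =>
    intro cur hcur
    simp only [pvMx, pvRuns]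
    by_cases hx : x < mt
    · rw [if_pos hx, if_pos hx]
      have hih := ih (cur + 1) (by omega)
      have hle := pv_cur_le_lmax mt t (cur + 1) (by omega)
      omega
    · rw [if_neg hx, if_neg hx]
      have hih := ih 0 le_rfl
      by_cases h : cur ≠ 0
      · rw [if_pos h]
        simp only [pvLmax, List.foldl_cons]
        rw [max_comm (-1099511627776 : Int) cur, pv_foldl_max_max]
        simp only [pvLmax] at hih
        omega
      · rw [if_neg h]
        have : cur = 0 := by omega
        subst this
        exact hih

theorem pv_mx_cases (mt : Int) (xs : List Int) : ∀ cur : Int, 0 ≤ cur →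
    pvMx mt xs cur = -1099511627776 ∨ 0 < pvMx mt xs cur := by
  induction xs with
  | nil => intro cur _; left; rfl
  | cons x t ih =>
    intro cur hcur
    simp only [pvMx]
    by_cases hx : x < mt
    · right
      rw [if_pos hx]
      have := le_max_left (cur + 1) (pvMx mt t (cur + 1))
      omega
    · rw [if_neg hx]
      exact ih 0 le_rfl

-- B's fold builds exactly pvRuns.
theorem pv_fold_runs (mt : Int) (xs : List Int) : ∀ (acc : List Int) (cur : Int),
    (if (xs.foldl
          (fun (st : List Int × Int) x =>
            if x < mt then (st.1, st.2 + 1)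
            else if st.2 ≠ 0 then (st.1 ++ [st.2], 0) else (st.1, 0))
          (acc, cur)).2 ≠ 0
     then (xs.foldl
          (fun (st : List Int × Int) x =>
            if x < mt then (st.1, st.2 + 1)
            else if st.2 ≠ 0 then (st.1 ++ [st.2], 0) else (st.1, 0))
          (acc, cur)).1 ++ [(xs.foldl
          (fun (st : List Int × Int) x =>
            if x < mt then (st.1, st.2 + 1)
            else if st.2 ≠ 0 then (st.1 ++ [st.2], 0) else (st.1, 0))
          (acc, cur)).2]
     else (xs.foldl
          (fun (st : List Int × Int) x =>
            if x < mt then (st.1, st.2 + 1)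
            else if st.2 ≠ 0 then (st.1 ++ [st.2], 0) else (st.1, 0))
          (acc, cur)).1) = acc ++ pvRuns mt xs cur := by
  induction xs with
  | nil =>
    intro acc cur
    simp only [List.foldl_nil, pvRuns]
    by_cases h : cur ≠ 0
    · rw [if_pos h, if_pos h]
    · rw [if_neg h, if_neg h]; simp
  | cons x t ih =>
    intro acc cur
    simp only [List.foldl_cons, pvRuns]
    by_cases hx : x < mt
    · rw [if_pos hx, if_pos hx]
      exact ih acc (cur + 1)
    · rw [if_neg hx, if_neg hx]
      by_cases h : cur ≠ 0
      · rw [if_pos h, if_pos h]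
        rw [ih (acc ++ [cur]) 0]
        simp
      · rw [if_neg h, if_neg h]
        exact ih acc 0

theorem pv_runs_eq (mt : Int) (xs : List Int) : check_NG_runs mt xs = pvRuns mt xs 0 := by
  have h := pv_fold_runs mt xs [] 0
  simp only [List.nil_append] at h
  simpa [check_NG_runs] using h

theorem pv_lmax_cons (r : Int) (rs : List Int) (hr : 0 < r) :
    pvLmax (r :: rs) = rs.foldl max r := by
  simp only [pvLmax, List.foldl_cons]
  have : max (-1099511627776 : Int) r = r := by omega
  rw [this]

-- ===== VERDICT (by name: the statement is the Claim_ definition above) =====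
theorem check_NG_conditions_spec : Claim_equal_check_NG_conditions := by
  intro lengths mt k ot hdom
  unfold Spec_check_NG_conditions
  have hkdom : -2147483648 ≤ k ∧ k ≤ 2147483648 := by
    unfold Dom_check_NG_conditions at hdom
    simp only [Bool.and_eq_true, pvDomInt, decide_eq_true_eq] at hdom
    exact hdom.1.2
  have hk : (-1099511627776 : Int) < k := by omega
  have hmain := pv_main mt lengths 0 le_rfl
  simp only [check_NG_conditions, check_NG_conditions_alt, pv_runs_eq]
  rcases pv_loop_cases mt k lengths 0 with hnone | hsome
  · -- loop finished: A = the over-threshold pass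
    rw [hnone]
    have hnotk : ¬ k ≤ pvMx mt lengths 0 := by
      intro hle
      have := (pv_loop_iff mt k hk lengths 0).2 hle
      rw [hnone] at this; cases this
    cases hruns : pvRuns mt lengths 0 with
    | nil => simp [PySem.List.max?, List.any_eq]
    | cons r rs =>
      have hrpos : 0 < r := pv_runs_pos mt lengths 0 le_rfl r (by rw [hruns]; exact List.mem_cons_self)
      rw [PySem.List.max?_id_cons]
      have hlm : pvLmax (r :: rs) = rs.foldl max r := pv_lmax_cons r rs hrpos
      have hge : r ≤ rs.foldl max r := pv_le_foldl_max rs r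
      have hnotk2 : ¬ k ≤ rs.foldl max r := by
        intro hle
        rw [hruns, hlm] at hmain
        omega
      simp [hnotk2, List.any_eq]
  · -- early return: A = true, and B's longest run reaches k
    rw [hsome]
    have hle : k ≤ pvMx mt lengths 0 := (pv_loop_iff mt k hk lengths 0).1 hsome
    have hpos : 0 < pvMx mt lengths 0 := by
      rcases pv_mx_cases mt lengths 0 le_rfl with h | h
      · omega
      · exact h
    cases hruns : pvRuns mt lengths 0 with
    | nil =>
      exfalso
      rw [hruns] at hmain
      simp only [pvLmax, List.foldl_nil] at hmain
      omega
    | cons r rs =>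
      have hrpos : 0 < r := pv_runs_pos mt lengths 0 le_rfl r (by rw [hruns]; exact List.mem_cons_self)
      rw [PySem.List.max?_id_cons]
      have hlm : pvLmax (r :: rs) = rs.foldl max r := pv_lmax_cons r rs hrpos
      have hge : r ≤ rs.foldl max r := pv_le_foldl_max rs r
      have hkle : k ≤ rs.foldl max r := by
        rw [hruns, hlm] at hmain
        omega
      simp [hkle]
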